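-- pv_equiv track=rewrite | github.com/aankur-kumar777/drug-interaction-checker | backend/models/predictor.py | _check_opposite_effects
-- ===== SOURCE A (Python) =====
-- from typing import Dict, List, Tuple
--
-- def _check_opposite_effects(props1: Dict, props2: Dict) -> bool:
--     """Check if drugs have opposite pharmacological effects"""
--     # Simplified check - in production, use comprehensive database
--     opposite_pairs = [
--         ('anticoagulant', 'procoagulant'),
--         ('antihypertensive', 'vasoconstrictor'),
--     ]
--
--     class1 = props1.get('therapeutic_class', '')
--     class2 = props2.get('therapeutic_class', '')
--
--     for pair in opposite_pairs:
--         if (class1 in pair and class2 in pair) and class1 != class2: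
--             return True
--
--     return False
-- ===== SOURCE B (Python) =====
-- def _check_opposite_effects(props1, props2):
--     """Check if drugs have opposite pharmacological effects"""
--     # Flat class list: opposites sit at indices 2k and 2k+1, so two classes are
--     # opposite exactly when their indices differ only in the lowest bit (i ^ 1 == j).
--     CLASSES = ['anticoagulant', 'procoagulant', 'antihypertensive', 'vasoconstrictor']
--     c1 = props1.get('therapeutic_class', '')
--     c2 = props2.get('therapeutic_class', '')
--     if c1 in CLASSES and c2 in CLASSES:
--         return CLASSES.index(c1) ^ 1 == CLASSES.index(c2)
--     return False
-- ===== Notes on version B (the rewrite author's own statement) =====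
-- stated objective: alternative
-- what changed: Replaces the scan over unordered opposite pairs (tuple membership plus a distinctness guard) by an index encoding: classes are laid out in a flat list with opposites at adjacent even/odd positions, and opposition is decided arithmetically by XOR-ing the first index with 1 and comparing with the second.
import Mathlib
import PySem

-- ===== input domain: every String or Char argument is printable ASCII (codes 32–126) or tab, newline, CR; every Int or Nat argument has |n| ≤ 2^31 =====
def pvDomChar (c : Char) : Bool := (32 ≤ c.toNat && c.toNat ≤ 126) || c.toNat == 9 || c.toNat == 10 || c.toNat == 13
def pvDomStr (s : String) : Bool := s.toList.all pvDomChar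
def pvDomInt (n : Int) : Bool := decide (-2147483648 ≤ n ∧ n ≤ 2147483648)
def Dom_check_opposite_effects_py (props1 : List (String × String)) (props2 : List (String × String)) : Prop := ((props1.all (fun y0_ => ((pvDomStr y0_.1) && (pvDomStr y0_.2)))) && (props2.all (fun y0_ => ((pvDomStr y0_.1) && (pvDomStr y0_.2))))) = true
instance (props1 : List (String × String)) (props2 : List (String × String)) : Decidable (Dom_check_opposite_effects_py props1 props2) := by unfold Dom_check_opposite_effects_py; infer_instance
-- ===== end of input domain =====

-- B replaces A's scan over opposite pairs by an index encoding (opposites adjacent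
-- in a flat list, opposition = XOR of indices with 1); a different formulation of
-- the same check, not claimed faster.

-- ===== PORT A =====
def pvOppositePairs : List (String × String) :=
  [("anticoagulant", "procoagulant"), ("antihypertensive", "vasoconstrictor")]

-- `for pair in opposite_pairs: if (class1 in pair and class2 in pair) and class1 != class2: return True`
def pvALoop (class1 class2 : String) : List (String × String) → Bool
  | [] => false
  | pair :: rest =>
    if ((class1 = pair.1 ∨ class1 = pair.2) ∧ (class2 = pair.1 ∨ class2 = pair.2) ∧ class1 ≠ class2) then
      true
    else
      pvALoop class1 class2 rest

def check_opposite_effects_py (props1 : List (String × String)) (props2 : List (String × String)) : Bool :=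
  let class1 := PySem.Dict.getD (PySem.Dict.mk props1) "therapeutic_class" ""
  let class2 := PySem.Dict.getD (PySem.Dict.mk props2) "therapeutic_class" ""
  pvALoop class1 class2 pvOppositePairs

-- ===== PORT B =====
def pvClasses : List String :=
  ["anticoagulant", "procoagulant", "antihypertensive", "vasoconstrictor"]

def check_opposite_effects_py_alt (props1 : List (String × String)) (props2 : List (String × String)) : Bool :=
  let c1 := PySem.Dict.getD (PySem.Dict.mk props1) "therapeutic_class" ""
  let c2 := PySem.Dict.getD (PySem.Dict.mk props2) "therapeutic_class" ""
  if c1 ∈ pvClasses ∧ c2 ∈ pvClasses then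
    match PySem.List.index? pvClasses c1, PySem.List.index? pvClasses c2 with
    | some i, some j => decide (i ^^^ 1 = j)
    | _, _ => false
  else
    false

-- ===== PRECONDITION & SPEC =====
def Spec_check_opposite_effects_py (props1 : List (String × String)) (props2 : List (String × String)) (out : Bool) : Prop := out = check_opposite_effects_py_alt props1 props2
instance (props1 : List (String × String)) (props2 : List (String × String)) (out : Bool) : Decidable (Spec_check_opposite_effects_py props1 props2 out) := by unfold Spec_check_opposite_effects_py; infer_instance

-- ===== CLAIM (what is proved, stated in full; the proofs are below) =====
def Claim_equal_check_opposite_effects_py : Prop := ∀ (props1 : List (String × String)) (props2 : List (String × String)), Dom_check_opposite_effects_py props1 props2 → Spec_check_opposite_effects_py props1 props2 (check_opposite_effects_py props1 props2)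

-- ===== LEMMAS AND PROOFS =====

-- the core fact, over the two extracted class strings
theorem pvCore (c1 c2 : String) :
    pvALoop c1 c2 pvOppositePairs =
      (if c1 ∈ pvClasses ∧ c2 ∈ pvClasses then
        match PySem.List.index? pvClasses c1, PySem.List.index? pvClasses c2 with
        | some i, some j => decide (i ^^^ 1 = j)
        | _, _ => false
      else false) := by
  by_cases h1 : c1 = "anticoagulant" <;>
  by_cases h2 : c1 = "procoagulant" <;>
  by_cases h3 : c1 = "antihypertensive" <;>
  by_cases h4 : c1 = "vasoconstrictor" <;>
  by_cases g1 : c2 = "anticoagulant" <;>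
  by_cases g2 : c2 = "procoagulant" <;>
  by_cases g3 : c2 = "antihypertensive" <;>
  by_cases g4 : c2 = "vasoconstrictor" <;>
  simp_all [pvALoop, pvOppositePairs, pvClasses, PySem.List.index?, List.idxOf?,
    List.findIdx?, List.findIdx?.go, eq_comm]

-- ===== VERDICT (by name: the statement is the Claim_ definition above) =====
theorem check_opposite_effects_py_spec : Claim_equal_check_opposite_effects_py := by
  intro props1 props2 _
  unfold Spec_check_opposite_effects_py check_opposite_effects_py check_opposite_effects_py_alt
  exact pvCore _ _
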